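-- pv_equiv track=rewrite | github.com/DAMSlabUMBC/Pub-Sub-Privacy | benchmark/BenchmarkClient.py | find_described_purposes
-- ===== SOURCE A (Python) =====
-- import itertools
--
-- def find_described_purposes(purpose_filter: str) -> list[str]:
--
--     # Break purpose filter into individual purposes
--     filter_levels = purpose_filter.split('/')
--     decomposed_levels = list()
--
--     for level in filter_levels:
--         if '{' in level:
--             level = level.replace('{','').replace('}','').split(',')
--         else:
--             level = [level]
--
--         decomposed_levels.append(level)
--
--     described_purposes = list()
--     decomposed_purpose_list = itertools.product(*decomposed_levels)
--     for purpose_list in decomposed_purpose_list: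
--         purpose = '/'.join(purpose_list)
--         if not './' in purpose:
--             purpose = purpose.replace('/.', '')
--             described_purposes.append(purpose)
--
--     return described_purposes
-- ===== SOURCE B (Python) =====
-- def _options(level):
--     if '{' in level:
--         return level.replace('{', '').replace('}', '').split(',')
--     return [level]
--
-- def _decode(sizes, k):
--     # mixed-radix digits of k (last size is the least significant position)
--     if not sizes:
--         return (k, [])
--     q, ds = _decode(sizes[1:], k)
--     return (q // sizes[0], [q % sizes[0]] + ds)
--
-- def find_described_purposes(purpose_filter: str) -> list[str]:
--     opts = [_options(level) for level in purpose_filter.split('/')]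
--     sizes = [len(o) for o in opts]
--     total = 1
--     for s in sizes:
--         total *= s
--     purposes = ['/'.join(o[i] for o, i in zip(opts, _decode(sizes, k)[1]))
--                 for k in range(total)]
--     return [p.replace('/.', '') for p in purposes if './' not in p]
-- ===== Notes on version B (the rewrite author's own statement) =====
-- stated objective: alternative
-- what changed: Replaces itertools.product enumeration of the option lists by arithmetic ranking: it computes the total combination count, and for each rank k decodes k as mixed-radix digits (repeated divmod over the level sizes) to pick one option per level, then joins, filters './' and replaces '/.' as A does.
import Mathlib
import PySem

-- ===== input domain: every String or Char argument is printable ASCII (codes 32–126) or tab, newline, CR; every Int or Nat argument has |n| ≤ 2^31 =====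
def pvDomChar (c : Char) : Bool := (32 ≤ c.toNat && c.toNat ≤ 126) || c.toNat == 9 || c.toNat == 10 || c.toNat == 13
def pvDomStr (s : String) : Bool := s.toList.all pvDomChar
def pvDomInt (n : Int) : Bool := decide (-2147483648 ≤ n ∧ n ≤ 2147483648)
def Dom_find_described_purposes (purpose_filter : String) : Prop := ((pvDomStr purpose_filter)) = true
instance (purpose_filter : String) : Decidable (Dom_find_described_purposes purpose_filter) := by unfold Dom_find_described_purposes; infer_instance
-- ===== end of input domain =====

-- B replaces itertools.product enumeration by arithmetic ranking: it decodes each rank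
-- k < (product of level sizes) into mixed-radix digits choosing one option per level
-- (objective: alternative algorithm, same asymptotic cost).

-- ===== PORT A =====
-- itertools.product(*lists): tuples in lexicographic order, rightmost factor fastest
def pvProduct : List (List String) → List (List String)
  | [] => [[]]
  | x :: xs => x.flatMap (fun o => (pvProduct xs).map (o :: ·))

def find_described_purposes (purpose_filter : String) : List String :=
  let filter_levels := (PySem.Str.split? purpose_filter "/").getD []
  let decomposed_levels := filter_levels.foldl (fun acc level =>
    acc ++ [if PySem.Str.isIn "{" level then
              (PySem.Str.split? (PySem.Str.replace (PySem.Str.replace level "{" "") "}" "") ",").getD []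
            else [level]]) []
  (pvProduct decomposed_levels).foldl (fun described purpose_list =>
    let purpose := PySem.Str.join "/" purpose_list
    if PySem.Str.isIn "./" purpose then described
    else described ++ [PySem.Str.replace purpose "/." ""]) []

-- ===== PORT B =====
def pvOptions (level : String) : List String :=
  if PySem.Str.isIn "{" level then
    (PySem.Str.split? (PySem.Str.replace (PySem.Str.replace level "{" "") "}" "") ",").getD []
  else [level]

-- _decode(sizes, k): Python's divmod on nonnegative ints with positive divisor is
-- exactly Nat division/modulus, which is what these values are (sizes are list lengths).
def pvDecode : List Nat → Nat → Nat × List Nat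
  | [], k => (k, [])
  | s :: rest, k =>
    let qd := pvDecode rest k
    (qd.1 / s, qd.1 % s :: qd.2)

def find_described_purposes_alt (purpose_filter : String) : List String :=
  let opts := ((PySem.Str.split? purpose_filter "/").getD []).map pvOptions
  let sizes := opts.map List.length
  let total := sizes.foldl (· * ·) 1
  -- o[i] : i is a decoded digit, provably 0 ≤ i < len(o), where Python's o[i] = getD
  let purposes := (List.range total).map (fun k =>
    PySem.Str.join "/" ((opts.zip (pvDecode sizes k).2).map (fun p => p.1.getD p.2 "")))
  (purposes.filter (fun p => !(PySem.Str.isIn "./" p))).map (fun p => PySem.Str.replace p "/." "")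

-- ===== PRECONDITION & SPEC =====
def Spec_find_described_purposes (purpose_filter : String) (out : List String) : Prop := out = find_described_purposes_alt purpose_filter
instance (purpose_filter : String) (out : List String) : Decidable (Spec_find_described_purposes purpose_filter out) := by unfold Spec_find_described_purposes; infer_instance

-- ===== CLAIM (what is proved, stated in full; the proofs are below) =====
def Claim_equal_find_described_purposes : Prop := ∀ (purpose_filter : String), Dom_find_described_purposes purpose_filter → Spec_find_described_purposes purpose_filter (find_described_purposes purpose_filter)

-- ===== LEMMAS AND PROOFS =====

-- splitOn's worker always returns at least one piece
lemma pvSplitGo_ne_nil (sep : List Char) : ∀ (fuel : Nat) (l cur : List Char)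
    (acc : List (List Char)), PySem.Chars.splitOn.go sep fuel l cur acc ≠ [] := by
  intro fuel
  induction fuel with
  | zero => intro l cur acc; rw [PySem.Chars.splitOn.go.eq_def]; simp
  | succ n ih =>
    intro l cur acc
    rw [PySem.Chars.splitOn.go.eq_def]
    cases l with
    | nil => simp
    | cons c rest =>
      dsimp only
      split <;> apply ih

lemma pvSplit_ne_nil (s : String) : (PySem.Str.split? s ",").getD [] ≠ [] := by
  simp only [PySem.Str.split?, PySem.Chars.split?, PySem.Chars.splitOn]
  simp [pvSplitGo_ne_nil]

lemma pvOptions_ne_nil (level : String) : pvOptions level ≠ [] := by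
  unfold pvOptions
  split
  · exact pvSplit_ne_nil _
  · simp

-- foldl (*) 1 = product
lemma pvFoldMul (l : List Nat) : l.foldl (· * ·) 1 = l.prod := by
  simpa using (List.prod_eq_foldl (l := l)).symm

-- the quotient of the decoder is the leading digits
lemma pvDecode_fst (sizes : List Nat) (k : Nat) : (pvDecode sizes k).1 = k / sizes.prod := by
  induction sizes generalizing k with
  | nil => simp [pvDecode]
  | cons s rest ih =>
    simp only [pvDecode, ih, List.prod_cons]
    rw [Nat.div_div_eq_div_mul, Nat.mul_comm]

-- the decoded digits depend only on k modulo the total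
lemma pvDecode_snd_add (sizes : List Nat) (hpos : ∀ s ∈ sizes, 0 < s) :
    ∀ (i j : Nat), j < sizes.prod →
      (pvDecode sizes (i * sizes.prod + j)).2 = (pvDecode sizes j).2 := by
  induction sizes with
  | nil => intro i j hj; simp [pvDecode]
  | cons s rest ih =>
    intro i j hj
    have hrest : ∀ t ∈ rest, 0 < t := fun t ht => hpos t (List.mem_cons_of_mem _ ht)
    have hP : 0 < rest.prod := List.prod_pos hrest
    have hs : 0 < s := hpos s List.mem_cons_self
    set P := rest.prod with hPdef
    have hjsplit : j = (j / P) * P + j % P := by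
      rw [Nat.div_add_mod' j P]
    have ha : j / P < s := by
      have hj' : j < s * P := by rw [hPdef]; simpa [List.prod_cons] using hj
      rw [Nat.div_lt_iff_lt_mul hP]
      exact hj' 
    have hb : j % P < P := Nat.mod_lt _ hP
    have hk : i * (s * P) + j = (i * s + j / P) * P + j % P := by
      calc i * (s * P) + j = i * (s * P) + ((j / P) * P + j % P) := by rw [← hjsplit]
        _ = (i * s + j / P) * P + j % P := by ring
    have hdiv : ∀ (m : Nat), (m * P + j % P) / P = m := fun m => by
      rw [Nat.mul_comm m P, Nat.mul_add_div hP, Nat.div_eq_of_lt hb, Nat.add_zero]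
    simp only [pvDecode, List.prod_cons]
    rw [hk]
    have t1 : (pvDecode rest ((i * s + j / P) * P + j % P)).1 = i * s + j / P := by
      rw [pvDecode_fst, ← hPdef, hdiv]
    have t2 : (pvDecode rest j).1 = j / P := by rw [pvDecode_fst, ← hPdef]
    have tails : (pvDecode rest ((i * s + j / P) * P + j % P)).2 = (pvDecode rest j).2 := by
      rw [ih hrest _ _ hb]
      conv_rhs => rw [hjsplit]
      rw [ih hrest _ _ hb]
    have heads : (i * s + j / P) % s = j / P := by
      rw [Nat.mul_comm i s, Nat.mul_add_mod, Nat.mod_eq_of_lt ha]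
    simp only [t1, t2, tails, heads, Nat.mod_eq_of_lt ha]

-- range over a product factors into nested ranges
lemma pvRange_mul (a b : Nat) :
    List.range (a * b) = (List.range a).flatMap (fun i => (List.range b).map (fun j => i * b + j)) := by
  induction a with
  | zero => simp
  | succ n ih =>
    rw [Nat.succ_mul, List.range_add, ih, List.range_succ, List.flatMap_append]
    simp [Nat.mul_comm]

-- a list is the enumeration of its own indices
lemma pvGetD_range {α : Type} (x : List α) (d : α) :
    (List.range x.length).map (fun i => x.getD i d) = x := by
  induction x with
  | nil => simp
  | cons a t ih =>
    rw [List.length_cons, List.range_succ_eq_map, List.map_cons]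
    simp only [List.map_map, Function.comp_def, List.getD_cons_zero, List.getD_cons_succ]
    rw [ih]

lemma pvFlatMap_congr {α β : Type} (l : List α) (f g : α → List β)
    (h : ∀ i ∈ l, f i = g i) : l.flatMap f = l.flatMap g := by
  induction l with
  | nil => rfl
  | cons a t ih =>
    simp only [List.flatMap_cons, h a List.mem_cons_self,
      ih (fun i hi => h i (List.mem_cons_of_mem _ hi))]

-- enumeration by rank decoding = Cartesian product
lemma pvEnum_eq_product (opts : List (List String)) (hne : ∀ o ∈ opts, o ≠ []) :
    (List.range (opts.map List.length).prod).map (fun k =>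
        (opts.zip (pvDecode (opts.map List.length) k).2).map (fun p => p.1.getD p.2 ""))
      = pvProduct opts := by
  induction opts with
  | nil => simp [pvProduct, List.range_one, pvDecode]
  | cons x xs ih =>
    have hne' : ∀ o ∈ xs, o ≠ [] := fun o ho => hne o (List.mem_cons_of_mem _ ho)
    have hpos : ∀ t ∈ xs.map List.length, 0 < t := by
      intro t ht
      obtain ⟨o, ho, rfl⟩ := List.mem_map.mp ht
      exact List.length_pos_iff.mpr (hne' o ho)
    have hP : 0 < (xs.map List.length).prod := List.prod_pos hpos
    set P := (xs.map List.length).prod with hPdef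
    have hprod : ((x :: xs).map List.length).prod = x.length * P := by
      rw [List.map_cons, List.prod_cons]
    rw [hprod, pvRange_mul, List.map_flatMap]
    have step : ∀ i ∈ List.range x.length,
        ((List.range P).map (fun j => i * P + j)).map (fun k =>
            ((x :: xs).zip (pvDecode ((x :: xs).map List.length) k).2).map
              (fun p => p.1.getD p.2 ""))
          = (pvProduct xs).map (fun tail => x.getD i "" :: tail) := by
      intro i hi
      have hi' : i < x.length := List.mem_range.mp hi
      rw [List.map_map]
      simp only [Function.comp_def]
      have inner : ∀ j ∈ List.range P,
          (((x :: xs).zip (pvDecode ((x :: xs).map List.length) (i * P + j)).2).map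
              (fun p => p.1.getD p.2 ""))
            = x.getD i "" :: ((xs.zip (pvDecode (xs.map List.length) j).2).map
                (fun p => p.1.getD p.2 "")) := by
        intro j hj
        have hj' : j < P := List.mem_range.mp hj
        have hfst : (pvDecode (xs.map List.length) (i * P + j)).1 = i := by
          rw [pvDecode_fst, ← hPdef]
          rw [Nat.mul_comm i P, Nat.mul_add_div hP, Nat.div_eq_of_lt hj', Nat.add_zero]
        have hsnd : (pvDecode (xs.map List.length) (i * P + j)).2
            = (pvDecode (xs.map List.length) j).2 := by
          have := pvDecode_snd_add (xs.map List.length) hpos i j (hPdef ▸ hj')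
          rwa [← hPdef] at this
        simp only [List.map_cons, pvDecode, hfst, hsnd, Nat.mod_eq_of_lt hi',
          List.zip_cons_cons, List.map_cons]
      rw [List.map_congr_left inner, ← ih hne']
      rw [List.map_map]
      rfl
    rw [pvFlatMap_congr _ _ _ step]
    have hx : pvProduct (x :: xs)
        = ((List.range x.length).map (fun i => x.getD i "")).flatMap
            (fun o => (pvProduct xs).map (o :: ·)) := by
      rw [pvGetD_range]
      rfl
    rw [hx, List.flatMap_map]

-- A's output loop is a filter + map over the joined tuples
lemma pvOutLoop_eq (l : List (List String)) : ∀ (out : List String),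
    l.foldl (fun described purpose_list =>
        let purpose := PySem.Str.join "/" purpose_list
        if PySem.Str.isIn "./" purpose then described
        else described ++ [PySem.Str.replace purpose "/." ""]) out
      = out ++ ((l.map (PySem.Str.join "/")).filter
            (fun p => !(PySem.Str.isIn "./" p))).map (fun p => PySem.Str.replace p "/." "") := by
  induction l with
  | nil => intro out; simp
  | cons pl l' ih =>
    intro out
    simp only [List.foldl_cons, ih, List.map_cons, List.filter_cons]
    by_cases h : PySem.Str.isIn "./" (PySem.Str.join "/" pl) = true
    · simp only [h, Bool.not_true]; simp
    · simp only [Bool.not_eq_true] at h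
      simp only [h, Bool.not_false]; simp

-- ===== VERDICT (by name: the statement is the Claim_ definition above) =====
theorem find_described_purposes_spec : Claim_equal_find_described_purposes := by
  intro pf _
  unfold Spec_find_described_purposes find_described_purposes find_described_purposes_alt
  simp only [PySem.List.foldl_append_singleton_eq_map, List.nil_append]
  rw [pvOutLoop_eq, List.nil_append]
  have hmapeq : ((PySem.Str.split? pf "/").getD []).map (fun level =>
      if PySem.Str.isIn "{" level then
        (PySem.Str.split? (PySem.Str.replace (PySem.Str.replace level "{" "") "}" "") ",").getD []
      else [level]) = ((PySem.Str.split? pf "/").getD []).map pvOptions := rfl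
  rw [hmapeq, pvFoldMul,
    ← pvEnum_eq_product (((PySem.Str.split? pf "/").getD []).map pvOptions)
      (by intro o ho; obtain ⟨l, _, rfl⟩ := List.mem_map.mp ho; exact pvOptions_ne_nil l),
    List.map_map]
  rfl
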